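-- pv_equiv track=rewrite | github.com/pkuwwt/pkuwwt.github.io | programming/assets/epa.py | five_bits
-- ===== SOURCE A (Python) =====
-- from typing import List
--
-- def number_of_leading_zeros(value: int) -> int:
--     count = 32
--     while value != 0:
--         count = count - 1
--         value = value >> 1
--     return count
--
-- def five_bits(value: int) -> List[int]:
--     lenBits = 32 - number_of_leading_zeros(value)
--     length = int(lenBits * 0.2 + 0.99)
--     mask = 0x1F
--     offset = 0x3F
--     result = []
--     for i in range(length):
--         if i == length - 1:
--             result.append((value & mask) + offset)
--         else:
--             result.append(((value & mask) | 0x20) + offset)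
--         value = value >> 5
--     return result
-- ===== SOURCE B (Python) =====
-- from typing import List
--
-- def five_bits(value: int) -> List[int]:
--     chunks = []
--     while value != 0:
--         chunks.append(value & 0x1F)
--         value >>= 5
--     result = []
--     last = len(chunks) - 1
--     for i, c in enumerate(chunks):
--         if i == last:
--             result.append(c + 0x3F)
--         else:
--             result.append((c | 0x20) + 0x3F)
--     return result
-- ===== Notes on version B (the rewrite author's own statement) =====
-- stated objective: simpler
-- what changed: B drops the number_of_leading_zeros helper and the float-arithmetic length formula: it collects the raw 5-bit chunks with a while-until-zero loop (value & 0x1F, value >>= 5) and then marks the last chunk in a second enumerate pass, instead of precomputing the chunk count from a leading-zero count via int(lenBits*0.2+0.99).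
import Mathlib
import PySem

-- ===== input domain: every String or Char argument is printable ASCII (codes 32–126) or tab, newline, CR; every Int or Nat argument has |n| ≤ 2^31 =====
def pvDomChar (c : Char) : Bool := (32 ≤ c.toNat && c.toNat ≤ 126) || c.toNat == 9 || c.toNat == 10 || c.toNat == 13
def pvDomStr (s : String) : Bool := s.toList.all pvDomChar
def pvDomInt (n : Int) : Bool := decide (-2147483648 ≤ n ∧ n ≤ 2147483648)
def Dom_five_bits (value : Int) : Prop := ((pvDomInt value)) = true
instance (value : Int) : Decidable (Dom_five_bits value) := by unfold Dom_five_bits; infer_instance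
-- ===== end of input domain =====

-- B: collects the 5-bit chunks with a while-until-zero loop and marks the last chunk in a
-- second enumerate pass, replacing the leading-zero counter and the float length formula (simpler).


-- ===== PORT A =====
-- while value != 0 loop of number_of_leading_zeros; fuel 64 suffices for every
-- nonnegative value admitted by Dom (at most 33 iterations); negative values, on
-- which Python loops forever, are outside Pre_.
def number_of_leading_zeros_go (fuel : Nat) (count : Int) (value : Int) : Int :=
  match fuel with
  | 0 => count
  | f + 1 => if value ≠ 0 then number_of_leading_zeros_go f (count - 1) (value >>> 1) else count

def number_of_leading_zeros (value : Int) : Int :=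
  number_of_leading_zeros_go 64 32 value

def five_bits (value : Int) : List Int :=
  let lenBits := 32 - number_of_leading_zeros value
  -- int(lenBits * 0.2 + 0.99): ported as the integer expression (lenBits + 4) // 5,
  -- which is exact for lenBits ∈ 0..32 (verified against CPython for all 33 values).
  let length := PySem.Int.floordiv (lenBits + 4) 5
  let mask : Int := 0x1F
  let offset : Int := 0x3F
  ((PySem.List.pyRange 0 length 1).foldl
    (fun (st : Int × List Int) i =>
      (st.1 >>> 5,
       if i == length - 1 then st.2 ++ [PySem.Int.band st.1 mask + offset]
       else st.2 ++ [PySem.Int.bor (PySem.Int.band st.1 mask) 0x20 + offset]))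
    (value, [])).2

-- ===== PORT B =====
-- while value != 0 chunk loop of B; fuel 64 suffices for every nonnegative value
-- admitted by Dom (at most 7 chunks); negative values, on which Python loops
-- forever, are outside Pre_.
def five_bits_alt_chunks (fuel : Nat) (value : Int) (chunks : List Int) : List Int :=
  match fuel with
  | 0 => chunks
  | f + 1 =>
    if value ≠ 0 then five_bits_alt_chunks f (value >>> 5) (chunks ++ [PySem.Int.band value 0x1F])
    else chunks

def five_bits_alt (value : Int) : List Int :=
  let chunks := five_bits_alt_chunks 64 value []
  let last : Int := (chunks.length : Int) - 1
  (PySem.List.enumerate chunks 0).foldl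
    (fun result ic =>
      if ic.1 == last then result ++ [ic.2 + 0x3F]
      else result ++ [PySem.Int.bor ic.2 0x20 + 0x3F])
    []

-- ===== PRECONDITION & SPEC =====
-- Pre_ excludes negative values, on which the while-until-zero loops of both A and B never
-- terminate (arithmetic shift of a negative number never reaches 0), so A returns no value there.
def Pre_five_bits (value : Int) : Prop := 0 ≤ value
instance (value : Int) : Decidable (Pre_five_bits value) := by unfold Pre_five_bits; infer_instance
def pvWitness_five_bits : Int := (1000)

def Spec_five_bits (value : Int) (out : List Int) : Prop := out = five_bits_alt value
instance (value : Int) (out : List Int) : Decidable (Spec_five_bits value out) := by unfold Spec_five_bits; infer_instance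

-- ===== CLAIM (what is proved, stated in full; the proofs are below) =====
def Claim_equal_five_bits : Prop := ∀ (value : Int), Dom_five_bits value → Pre_five_bits value → Spec_five_bits value (five_bits value)

-- ===== LEMMAS AND PROOFS =====

-- bit length of a natural number
def bitLen (n : Nat) : Nat :=
  if n = 0 then 0 else bitLen (n / 2) + 1
decreasing_by exact Nat.div_lt_self (Nat.pos_of_ne_zero (by assumption)) (by norm_num)

-- the 5-bit chunks of n, low first (proof-side model of B's first loop)
def chunksN (n : Nat) : List Int :=
  if n = 0 then [] else PySem.Int.band (↑n) 0x1F :: chunksN (n / 32)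
decreasing_by exact Nat.div_lt_self (Nat.pos_of_ne_zero (by assumption)) (by norm_num)

-- chunk count
def clen (n : Nat) : Nat :=
  if n = 0 then 0 else clen (n / 32) + 1
decreasing_by exact Nat.div_lt_self (Nat.pos_of_ne_zero (by assumption)) (by norm_num)

-- the common emission recursion: k chunks of v, last one marked
def emit (k : Nat) (v : Int) : List Int :=
  match k with
  | 0 => []
  | k + 1 =>
    (if k = 0 then PySem.Int.band v 0x1F + 0x3F
     else PySem.Int.bor (PySem.Int.band v 0x1F) 0x20 + 0x3F) :: emit k (v >>> 5)

-- mark the last element of a chunk list (proof-side model of B's second loop)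
def mapLast : List Int → List Int
  | [] => []
  | [c] => [c + 0x3F]
  | c :: c2 :: cs => (PySem.Int.bor c 0x20 + 0x3F) :: mapLast (c2 :: cs)

theorem intShift1 (n : Nat) : ((n : Int) >>> (1 : Int)) = ((n / 2 : Nat) : Int) := by
  have h := Int.shiftRight_natCast n 1
  rw [show ((1 : Nat) : Int) = (1 : Int) from rfl] at h
  rw [h, Nat.shiftRight_one]

theorem intShift5 (n : Nat) : ((n : Int) >>> (5 : Int)) = ((n / 32 : Nat) : Int) := by
  have h := Int.shiftRight_natCast n 5
  rw [show ((5 : Nat) : Int) = (5 : Int) from rfl] at h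
  rw [h, Nat.shiftRight_eq_div_pow]

theorem bitLen_succ (n : Nat) (h : n ≠ 0) : bitLen n = bitLen (n / 2) + 1 := by
  rw [bitLen, if_neg h]

theorem bitLen_zero : bitLen 0 = 0 := by rw [bitLen]; simp

theorem bitLen_zero_iff (n : Nat) : bitLen n = 0 ↔ n = 0 := by
  constructor
  · intro h
    by_contra hn
    rw [bitLen_succ n hn] at h
    omega
  · intro h; subst h; exact bitLen_zero

theorem clen_succ (n : Nat) (h : n ≠ 0) : clen n = clen (n / 32) + 1 := by
  rw [clen, if_neg h]

theorem clen_zero : clen 0 = 0 := by rw [clen]; simp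

theorem clen_zero_iff (n : Nat) : clen n = 0 ↔ n = 0 := by
  constructor
  · intro h
    by_contra hn
    rw [clen_succ n hn] at h
    omega
  · intro h; subst h; exact clen_zero

theorem chunksN_succ (n : Nat) (h : n ≠ 0) :
    chunksN n = PySem.Int.band (↑n) 0x1F :: chunksN (n / 32) := by
  rw [chunksN, if_neg h]

theorem chunksN_zero : chunksN 0 = [] := by rw [chunksN]; simp

theorem nlz_go_eq (fuel : Nat) : ∀ (n : Nat) (count : Int), bitLen n ≤ fuel →
    number_of_leading_zeros_go fuel count (↑n) = count - bitLen n := by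
  induction fuel with
  | zero =>
    intro n count h
    have h0 : n = 0 := (bitLen_zero_iff n).mp (Nat.le_zero.mp h)
    subst h0
    simp [number_of_leading_zeros_go, bitLen_zero]
  | succ f IH =>
    intro n count h
    by_cases hn : n = 0
    · subst hn
      simp [number_of_leading_zeros_go, bitLen_zero]
    · have hne : (↑n : Int) ≠ 0 := Int.natCast_ne_zero.mpr hn
      rw [number_of_leading_zeros_go, if_pos hne]
      rw [intShift1 n]
      rw [bitLen_succ n hn] at h ⊢
      rw [IH (n / 2) (count - 1) (by omega)]
      push_cast
      ring

theorem bitLen_le_of_lt (k : Nat) : ∀ n : Nat, n < 2 ^ k → bitLen n ≤ k := by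
  induction k with
  | zero =>
    intro n h
    have : n = 0 := by omega
    subst this; rw [bitLen_zero]
  | succ k IH =>
    intro n h
    by_cases hn : n = 0
    · subst hn; rw [bitLen_zero]; omega
    · rw [bitLen_succ n hn]
      have hp : (2 : Nat) ^ (k + 1) = 2 ^ k * 2 := pow_succ 2 k
      have : n / 2 < 2 ^ k := by omega
      have := IH (n / 2) this
      omega

theorem lt_bitLen_of_le (k : Nat) : ∀ n : Nat, 2 ^ k ≤ n → k < bitLen n := by
  induction k with
  | zero =>
    intro n h
    have hn : n ≠ 0 := by omega
    rw [bitLen_succ n hn]; omega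
  | succ k IH =>
    intro n h
    have hp : (2 : Nat) ^ (k + 1) = 2 ^ k * 2 := pow_succ 2 k
    have hn : n ≠ 0 := by have := Nat.one_le_two_pow (n := k + 1); omega
    rw [bitLen_succ n hn]
    have : 2 ^ k ≤ n / 2 := by omega
    have := IH (n / 2) this
    omega

theorem bitLen_div32 (n : Nat) (h : 32 ≤ n) : bitLen (n / 32) + 5 = bitLen n := by
  have h1 : n ≠ 0 := by omega
  have h2 : n / 2 ≠ 0 := by omega
  have h3 : n / 2 / 2 ≠ 0 := by omega
  have h4 : n / 2 / 2 / 2 ≠ 0 := by omega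
  have h5 : n / 2 / 2 / 2 / 2 ≠ 0 := by omega
  have e : n / 2 / 2 / 2 / 2 / 2 = n / 32 := by omega
  rw [bitLen_succ n h1, bitLen_succ _ h2, bitLen_succ _ h3, bitLen_succ _ h4, bitLen_succ _ h5, e]

theorem clen_eq_ceil (n : Nat) : clen n = (bitLen n + 4) / 5 := by
  induction n using Nat.strong_induction_on with
  | _ n IH =>
    by_cases hn : n = 0
    · subst hn; rw [clen_zero, bitLen_zero]
    · by_cases h32 : n < 32
      · rw [clen_succ n hn, Nat.div_eq_of_lt h32, clen_zero]
        have hle : bitLen n ≤ 5 := bitLen_le_of_lt 5 n (by norm_num; omega)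
        have hge : 0 < bitLen n := lt_bitLen_of_le 0 n (by omega)
        omega
      · rw [clen_succ n hn]
        rw [IH (n / 32) (Nat.div_lt_self (by omega) (by norm_num))]
        have hd : bitLen (n / 32) + 5 = bitLen n := bitLen_div32 n (by omega)
        have hge : 5 < bitLen n := lt_bitLen_of_le 5 n (by norm_num; omega)
        omega

theorem clen_le_seven (n : Nat) (h : n ≤ 2 ^ 31) : clen n ≤ 7 := by
  have h1 : (2 : Nat) ^ 31 = 2147483648 := by norm_num
  have h2 : (2 : Nat) ^ 32 = 4294967296 := by norm_num
  have hb : bitLen n ≤ 32 := bitLen_le_of_lt 32 n (by omega)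
  rw [clen_eq_ceil]
  omega

-- A's foldl over range equals emit
theorem foldA_eq_emit (L : Int) (k : Nat) : ∀ (a v : Int) (acc : List Int), a + k = L →
    ((PySem.List.pyRange a L 1).foldl
      (fun (st : Int × List Int) i =>
        (st.1 >>> 5,
         if i == L - 1 then st.2 ++ [PySem.Int.band st.1 0x1F + 0x3F]
         else st.2 ++ [PySem.Int.bor (PySem.Int.band st.1 0x1F) 0x20 + 0x3F]))
      (v, acc)).2 = acc ++ emit k v := by
  induction k with
  | zero =>
    intro a v acc h
    rw [PySem.List.pyRange_one_eq_nil (by push_cast at h; omega)]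
    simp [emit]
  | succ k IH =>
    intro a v acc h
    push_cast at h
    rw [PySem.List.pyRange_one_cons (by omega)]
    rw [List.foldl_cons]
    simp only [beq_iff_eq] at IH ⊢
    by_cases hk : k = 0
    · subst hk
      rw [if_pos (by omega)]
      have := IH (a + 1) (v >>> 5) (acc ++ [PySem.Int.band v 0x1F + 0x3F]) (by push_cast; omega)
      rw [this]
      simp [emit]
    · rw [if_neg (by omega)]
      have := IH (a + 1) (v >>> 5)
        (acc ++ [PySem.Int.bor (PySem.Int.band v 0x1F) 0x20 + 0x3F]) (by omega)
      rw [this]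
      simp [emit, hk]

theorem chunks_go_eq (fuel : Nat) : ∀ (n : Nat) (acc : List Int), clen n ≤ fuel →
    five_bits_alt_chunks fuel (↑n) acc = acc ++ chunksN n := by
  induction fuel with
  | zero =>
    intro n acc h
    have h0 : n = 0 := (clen_zero_iff n).mp (Nat.le_zero.mp h)
    subst h0
    simp [five_bits_alt_chunks, chunksN_zero]
  | succ f IH =>
    intro n acc h
    by_cases hn : n = 0
    · subst hn
      simp [five_bits_alt_chunks, chunksN_zero]
    · have hne : (↑n : Int) ≠ 0 := Int.natCast_ne_zero.mpr hn
      rw [five_bits_alt_chunks, if_pos hne]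
      rw [intShift5 n]
      rw [clen_succ n hn] at h
      rw [IH (n / 32) _ (by omega)]
      rw [chunksN_succ n hn]
      simp

-- B's enumerate foldl, with `last` pinned correctly, marks the final element
theorem foldB_eq (L : Int) : ∀ (cs : List Int) (s : Int) (acc : List Int), s + cs.length = L →
    ((PySem.List.enumerate cs s).foldl
      (fun result ic =>
        if ic.1 == L - 1 then result ++ [ic.2 + 0x3F]
        else result ++ [PySem.Int.bor ic.2 0x20 + 0x3F]) acc)
      = acc ++ mapLast cs := by
  intro cs
  induction cs with
  | nil =>
    intro s acc h
    simp [PySem.List.enumerate_nil, mapLast]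
  | cons c rest IH =>
    intro s acc h
    rw [PySem.List.enumerate_cons, List.foldl_cons]
    simp only [beq_iff_eq] at IH ⊢
    cases rest with
    | nil =>
      simp only [List.length_cons, List.length_nil] at h
      rw [if_pos (by push_cast at h ⊢; omega)]
      simp [PySem.List.enumerate_nil, mapLast]
    | cons c2 cs' =>
      simp only [List.length_cons] at h
      rw [if_neg (by push_cast at h ⊢; omega)]
      rw [IH (s + 1) _ (by simp only [List.length_cons] at h ⊢; push_cast at h ⊢; omega)]
      simp [mapLast]

theorem mapLast_chunksN (n : Nat) : mapLast (chunksN n) = emit (clen n) (↑n) := by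
  induction n using Nat.strong_induction_on with
  | _ n IH =>
    by_cases hn : n = 0
    · subst hn; rw [chunksN_zero, clen_zero]; rfl
    · rw [chunksN_succ n hn, clen_succ n hn]
      by_cases h32 : n / 32 = 0
      · rw [h32, chunksN_zero, clen_zero]
        simp [mapLast, emit]
      · cases hc : chunksN (n / 32) with
        | nil => exact absurd ((by rw [chunksN_succ _ h32] at hc; exact hc : _) :
            PySem.Int.band (↑(n / 32)) 0x1F :: chunksN (n / 32 / 32) = []) (by simp)
        | cons c2 cs' =>
          have hml : mapLast (PySem.Int.band (↑n) 0x1F :: c2 :: cs')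
              = (PySem.Int.bor (PySem.Int.band (↑n) 0x1F) 0x20 + 0x3F) :: mapLast (c2 :: cs') := rfl
          rw [hml, ← hc]
          rw [IH (n / 32) (Nat.div_lt_self (by omega) (by norm_num))]
          have hk : clen (n / 32) ≠ 0 := fun h => h32 ((clen_zero_iff _).mp h)
          cases hck : clen (n / 32) with
          | zero => exact absurd hck hk
          | succ m =>
            simp only [emit, if_neg (by omega : ¬ (m + 1) = 0)]
            rw [intShift5 n]

theorem five_bits_alt_eq_emit (n : Nat) (h : n ≤ 2 ^ 31) :
    five_bits_alt (↑n) = emit (clen n) (↑n) := by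
  have hc : clen n ≤ 64 := le_trans (clen_le_seven n h) (by norm_num)
  simp only [five_bits_alt]
  rw [chunks_go_eq 64 n [] hc]
  rw [List.nil_append]
  rw [foldB_eq ((chunksN n).length : Int) (chunksN n) 0 [] (by omega)]
  rw [List.nil_append, mapLast_chunksN]

theorem five_bits_eq_emit (n : Nat) (h : n ≤ 2 ^ 31) :
    five_bits (↑n) = emit (clen n) (↑n) := by
  have h1 : (2 : Nat) ^ 31 = 2147483648 := by norm_num
  have h2 : (2 : Nat) ^ 32 = 4294967296 := by norm_num
  have hb : bitLen n ≤ 32 := bitLen_le_of_lt 32 n (by omega)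
  have hnlz : number_of_leading_zeros (↑n) = 32 - (bitLen n : Int) := by
    rw [number_of_leading_zeros, nlz_go_eq 64 n 32 (by omega)]
  have hlen : PySem.Int.floordiv (32 - (32 - (bitLen n : Int)) + 4) 5 = ((clen n : Nat) : Int) := by
    have : (32 - (32 - (bitLen n : Int)) + 4) = ((bitLen n + 4 : Nat) : Int) := by push_cast; ring
    rw [this]
    rw [show ((5 : Int)) = ((5 : Nat) : Int) from rfl]
    rw [PySem.Int.floordiv_natCast]
    rw [clen_eq_ceil]
  simp only [five_bits, hnlz, hlen]
  exact foldA_eq_emit ((clen n : Nat) : Int) (clen n) 0 (↑n) [] (by omega)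

-- ===== VERDICT (by name: the statement is the Claim_ definition above) =====
theorem five_bits_spec : Claim_equal_five_bits := by
  intro value hdom hpre
  unfold Spec_five_bits
  obtain ⟨n, rfl⟩ : ∃ n : Nat, value = ↑n := ⟨value.toNat, (Int.toNat_of_nonneg hpre).symm⟩
  unfold Dom_five_bits pvDomInt at hdom
  simp only [decide_eq_true_eq] at hdom
  have hn : n ≤ 2 ^ 31 := by
    have h1 : (2 : Nat) ^ 31 = 2147483648 := by norm_num
    omega
  rw [five_bits_eq_emit n hn, five_bits_alt_eq_emit n hn]
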